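-- pv_equiv track=rewrite | github.com/AdrielHigor/fuzzy_matching_benchmark | util.py | get_address_street_suffix
-- ===== SOURCE A (Python) =====
-- ADDRESS_VARIANTS = {
--     "Apartment": ["Apt", "Apartment", "Apmt", "Unit", "U"],
--     "Street": ["St", "Street", "Str", "Strt", "St."],
--     "Road": ["Rd", "Road", "Rd."],
--     "Drive": ["Dr", "Drive"],
--     "Lane": ["Ln", "Lane", "Ln."],
--     "Circle": ["Cir", "Circle", "Circ"],
--     "Court": ["Ct", "Court"],
--     "Place": ["Pl", "Place", "Pl."],
--     "Terrace": ["Ter", "Terrace"],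
--     "Highway": ["Hwy", "Highway"],
--     "Square": ["Sq", "Square"],
--     "Building": ["Bldg", "Building"],
--     "Floor": ["Fl", "Floor", "Fl."],
--     "Room": ["Rm", "Room"],
--     "Suite": ["Ste", "Suite", "Ste."],
--     "Grove": ["Grv", "Grove"],
--     "Boulevard": ["Blvd", "Boulevard"],
--     "Avenue": ["Ave", "Avenue", "Ave."],
-- }
--
-- def get_address_street_suffix(address):
--     """
--     Get the street suffix of an address
--     """
--
--     address = address.lower().split()
--     for part in address:
--         for key, value in ADDRESS_VARIANTS.items():
--             for value_part in value:
--                 if part == value_part.lower():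
--                     return key
--
--     return None
-- ===== SOURCE B (Python) =====
-- # Flat lowercase variant -> canonical key table written out directly (the 49
-- # lowered variants are pairwise distinct, so order/first-match is irrelevant).
-- _SUFFIX_KEY = {
--     "apt": "Apartment", "apartment": "Apartment", "apmt": "Apartment",
--     "unit": "Apartment", "u": "Apartment",
--     "st": "Street", "street": "Street", "str": "Street", "strt": "Street",
--     "st.": "Street",
--     "rd": "Road", "road": "Road", "rd.": "Road",
--     "dr": "Drive", "drive": "Drive",
--     "ln": "Lane", "lane": "Lane", "ln.": "Lane",
--     "cir": "Circle", "circle": "Circle", "circ": "Circle",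
--     "ct": "Court", "court": "Court",
--     "pl": "Place", "place": "Place", "pl.": "Place",
--     "ter": "Terrace", "terrace": "Terrace",
--     "hwy": "Highway", "highway": "Highway",
--     "sq": "Square", "square": "Square",
--     "bldg": "Building", "building": "Building",
--     "fl": "Floor", "floor": "Floor", "fl.": "Floor",
--     "rm": "Room", "room": "Room",
--     "ste": "Suite", "suite": "Suite", "ste.": "Suite",
--     "grv": "Grove", "grove": "Grove",
--     "blvd": "Boulevard", "boulevard": "Boulevard",
--     "ave": "Avenue", "avenue": "Avenue", "ave.": "Avenue",
-- }
--
--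
-- def get_address_street_suffix(address):
--     """
--     Get the street suffix of an address
--     """
--     return next(
--         (_SUFFIX_KEY[p] for p in address.lower().split() if p in _SUFFIX_KEY),
--         None,
--     )
-- ===== Notes on version B (the rewrite author's own statement) =====
-- stated objective: simpler
-- what changed: Replaced the three nested loops scanning every key's variant list per token by a flat literal lowercase variant->key dict and a single generator expression returning the first token found in it; correct because the 49 lowered variants are pairwise distinct.
import Mathlib
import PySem

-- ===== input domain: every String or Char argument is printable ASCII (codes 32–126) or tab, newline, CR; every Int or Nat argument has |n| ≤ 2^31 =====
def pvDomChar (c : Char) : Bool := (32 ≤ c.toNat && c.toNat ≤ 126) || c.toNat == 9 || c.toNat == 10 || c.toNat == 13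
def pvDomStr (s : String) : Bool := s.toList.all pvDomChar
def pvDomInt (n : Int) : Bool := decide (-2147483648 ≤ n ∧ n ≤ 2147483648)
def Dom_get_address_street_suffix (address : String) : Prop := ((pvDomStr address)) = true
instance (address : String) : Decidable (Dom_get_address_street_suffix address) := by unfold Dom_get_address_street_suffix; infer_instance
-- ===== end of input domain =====

-- B replaces A's three nested loops by one flat literal lowercase variant->key dict
-- and a single first-match pass over the tokens (simpler; same results since the
-- 49 lowered variants are pairwise distinct).

-- ===== PORT A =====
-- module constant ADDRESS_VARIANTS (dict iterated in insertion order)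
def pvTable : List (String × List String) :=
  [("Apartment", ["Apt", "Apartment", "Apmt", "Unit", "U"]),
   ("Street", ["St", "Street", "Str", "Strt", "St."]),
   ("Road", ["Rd", "Road", "Rd."]),
   ("Drive", ["Dr", "Drive"]),
   ("Lane", ["Ln", "Lane", "Ln."]),
   ("Circle", ["Cir", "Circle", "Circ"]),
   ("Court", ["Ct", "Court"]),
   ("Place", ["Pl", "Place", "Pl."]),
   ("Terrace", ["Ter", "Terrace"]),
   ("Highway", ["Hwy", "Highway"]),
   ("Square", ["Sq", "Square"]),
   ("Building", ["Bldg", "Building"]),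
   ("Floor", ["Fl", "Floor", "Fl."]),
   ("Room", ["Rm", "Room"]),
   ("Suite", ["Ste", "Suite", "Ste."]),
   ("Grove", ["Grv", "Grove"]),
   ("Boulevard", ["Blvd", "Boulevard"]),
   ("Avenue", ["Ave", "Avenue", "Ave."])]

-- innermost loop: for value_part in value: if part == value_part.lower(): return key
def pvInnerVars (part key : String) : List String → Option String
  | [] => none
  | v :: vs => if part == PySem.Str.lower v then some key else pvInnerVars part key vs

-- middle loop: for key, value in ADDRESS_VARIANTS.items(): …
def pvInnerKeys (part : String) : List (String × List String) → Option String
  | [] => none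
  | kv :: rest =>
    match pvInnerVars part kv.1 kv.2 with
    | some r => some r
    | none => pvInnerKeys part rest

-- outer loop: for part in address: …
def pvOuterA : List String → Option String
  | [] => none
  | p :: ps =>
    match pvInnerKeys p pvTable with
    | some r => some r
    | none => pvOuterA ps

def get_address_street_suffix (address : String) : Option String :=
  pvOuterA (PySem.Str.split₀ (PySem.Str.lower address))

-- ===== PORT B =====
-- _SUFFIX_KEY: the flat literal dict from Source B
def pvSuffixKey : PySem.Dict String String :=
  PySem.Dict.ofList
    [("apt", "Apartment"), ("apartment", "Apartment"), ("apmt", "Apartment"),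
     ("unit", "Apartment"), ("u", "Apartment"),
     ("st", "Street"), ("street", "Street"), ("str", "Street"), ("strt", "Street"),
     ("st.", "Street"),
     ("rd", "Road"), ("road", "Road"), ("rd.", "Road"),
     ("dr", "Drive"), ("drive", "Drive"),
     ("ln", "Lane"), ("lane", "Lane"), ("ln.", "Lane"),
     ("cir", "Circle"), ("circle", "Circle"), ("circ", "Circle"),
     ("ct", "Court"), ("court", "Court"),
     ("pl", "Place"), ("place", "Place"), ("pl.", "Place"),
     ("ter", "Terrace"), ("terrace", "Terrace"),
     ("hwy", "Highway"), ("highway", "Highway"),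
     ("sq", "Square"), ("square", "Square"),
     ("bldg", "Building"), ("building", "Building"),
     ("fl", "Floor"), ("floor", "Floor"), ("fl.", "Floor"),
     ("rm", "Room"), ("room", "Room"),
     ("ste", "Suite"), ("suite", "Suite"), ("ste.", "Suite"),
     ("grv", "Grove"), ("grove", "Grove"),
     ("blvd", "Boulevard"), ("boulevard", "Boulevard"),
     ("ave", "Avenue"), ("avenue", "Avenue"), ("ave.", "Avenue")]

-- next((_SUFFIX_KEY[p] for p in address.lower().split() if p in _SUFFIX_KEY), None)
def get_address_street_suffix_alt (address : String) : Option String :=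
  (PySem.Str.split₀ (PySem.Str.lower address)).findSome? (fun p => pvSuffixKey.get? p)

-- ===== PRECONDITION & SPEC =====
def Spec_get_address_street_suffix (address : String) (out : Option String) : Prop := out = get_address_street_suffix_alt address
instance (address : String) (out : Option String) : Decidable (Spec_get_address_street_suffix address out) := by unfold Spec_get_address_street_suffix; infer_instance

-- ===== CLAIM =====
def Claim_equal_get_address_street_suffix : Prop := ∀ (address : String), Dom_get_address_street_suffix address → Spec_get_address_street_suffix address (get_address_street_suffix address)

-- ===== LEMMAS AND PROOFS =====

-- flattened (lowered variant, key) pairs in A's scan order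
def pvFlatten : List (String × List String) → List (String × String)
  | [] => []
  | kv :: rest => kv.2.map (fun v => (PySem.Str.lower v, kv.1)) ++ pvFlatten rest

-- first-match association lookup
def pvAssocFind (p : String) : List (String × String) → Option String
  | [] => none
  | kv :: rest => if p == kv.1 then some kv.2 else pvAssocFind p rest

theorem pvAssocFind_append (p : String) (l1 l2 : List (String × String)) :
    pvAssocFind p (l1 ++ l2) =
      match pvAssocFind p l1 with
      | some r => some r
      | none => pvAssocFind p l2 := by
  induction l1 with
  | nil => simp [pvAssocFind]
  | cons kv rest ih =>
    simp only [List.cons_append, pvAssocFind]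
    split_ifs <;> simp [ih]

theorem pvInnerVars_eq (p key : String) (vs : List String) :
    pvInnerVars p key vs = pvAssocFind p (vs.map (fun v => (PySem.Str.lower v, key))) := by
  induction vs with
  | nil => rfl
  | cons v vs ih => simp only [pvInnerVars, List.map_cons, pvAssocFind, ih]

theorem pvInnerKeys_eq (p : String) (tbl : List (String × List String)) :
    pvInnerKeys p tbl = pvAssocFind p (pvFlatten tbl) := by
  induction tbl with
  | nil => rfl
  | cons kv rest ih =>
    simp only [pvInnerKeys, pvFlatten, pvAssocFind_append, pvInnerVars_eq, ih]

theorem pvGet_mk_eq (p : String) (l : List (String × String)) :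
    (PySem.Dict.mk l).get? p = pvAssocFind p l := by
  induction l with
  | nil => rfl
  | cons kv rest ih =>
    rw [PySem.Dict.get?_mk_cons, pvAssocFind]
    by_cases h : p = kv.1
    · simp [h]
    · simp [h, Ne.symm h, ih]

set_option maxRecDepth 4000 in
theorem pvSuffixKey_eq_mk :
    pvSuffixKey.get? = (PySem.Dict.mk (pvFlatten pvTable)).get? := by
  have h : pvSuffixKey = PySem.Dict.mk (pvFlatten pvTable) := by decide
  rw [h]

theorem pvPerPart (p : String) : pvInnerKeys p pvTable = pvSuffixKey.get? p := by
  rw [pvInnerKeys_eq, pvSuffixKey_eq_mk, pvGet_mk_eq]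

theorem pvOuter_eq (ps : List String) :
    pvOuterA ps = ps.findSome? (fun p => pvSuffixKey.get? p) := by
  induction ps with
  | nil => rfl
  | cons p rest ih =>
    show (match pvInnerKeys p pvTable with
          | some r => some r
          | none => pvOuterA rest) = _
    rw [List.findSome?_cons, pvPerPart, ih]
    cases pvSuffixKey.get? p <;> rfl

-- ===== VERDICT =====
theorem get_address_street_suffix_spec : Claim_equal_get_address_street_suffix := by
  intro address _
  unfold Spec_get_address_street_suffix get_address_street_suffix get_address_street_suffix_alt
  exact pvOuter_eq _
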